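-- pv_equiv track=rewrite | github.com/marcus255/aoc | 2022/task_18.py | create_faces
-- ===== SOURCE A (Python) =====
-- def create_faces(x, y, z):
--     faces = [[] for _ in range(6)]
--     # Use binary numbers 000-111 to get all 8 vertices
--     for i in range(0b111 + 1):
--         zi = i & 1
--         yi = (i >> 1) & 1
--         xi = (i >> 2) & 1
--         vertex = (x + xi, y + yi, z + zi)
--         faces[0 if zi else 1].append(vertex)
--         faces[2 if yi else 3].append(vertex)
--         faces[4 if xi else 5].append(vertex)
--     return [tuple(w) for w in faces]
-- ===== SOURCE B (Python) =====
-- def create_faces(x, y, z):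
--     v000 = (x, y, z)
--     v001 = (x, y, z + 1)
--     v010 = (x, y + 1, z)
--     v011 = (x, y + 1, z + 1)
--     v100 = (x + 1, y, z)
--     v101 = (x + 1, y, z + 1)
--     v110 = (x + 1, y + 1, z)
--     v111 = (x + 1, y + 1, z + 1)
--     return [
--         (v001, v011, v101, v111),
--         (v000, v010, v100, v110),
--         (v010, v011, v110, v111),
--         (v000, v001, v100, v101),
--         (v100, v101, v110, v111),
--         (v000, v001, v010, v011),
--     ]
-- ===== Notes on version B (the rewrite author's own statement) =====
-- stated objective: simpler
-- what changed: Replaces the bit-manipulation vertex-scatter loop over the 8 corner indices with a direct closed-form table: the 8 corners are named once and each of the 6 faces is written out literally.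
import Mathlib
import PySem

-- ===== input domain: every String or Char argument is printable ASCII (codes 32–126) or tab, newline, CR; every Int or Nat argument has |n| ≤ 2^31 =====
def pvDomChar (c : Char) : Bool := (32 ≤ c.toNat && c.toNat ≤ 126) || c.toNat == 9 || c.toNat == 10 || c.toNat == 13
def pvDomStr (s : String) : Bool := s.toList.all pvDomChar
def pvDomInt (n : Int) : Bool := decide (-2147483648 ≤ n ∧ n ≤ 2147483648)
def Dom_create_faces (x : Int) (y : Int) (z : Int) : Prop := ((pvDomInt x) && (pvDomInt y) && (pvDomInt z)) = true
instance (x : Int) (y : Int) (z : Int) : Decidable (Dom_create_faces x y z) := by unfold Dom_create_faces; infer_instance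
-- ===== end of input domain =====

-- B replaces the bit-manipulation vertex-scatter loop with a closed-form table of the 6 faces (objective: simpler).

-- ===== PORT A =====
-- faces[k].append(v)
def pvAppendAt {α : Type} : List (List α) → Nat → α → List (List α)
  | [], _, _ => []
  | l :: ls, 0, v => (l ++ [v]) :: ls
  | l :: ls, n+1, v => l :: pvAppendAt ls n v

def create_faces (x : Int) (y : Int) (z : Int) : List (List (Int × Int × Int)) :=
  let faces : List (List (Int × Int × Int)) := [[], [], [], [], [], []]
  -- for i in range(8): i & 1 = i % 2, (i >> 1) & 1 = (i / 2) % 2, (i >> 2) & 1 = (i / 4) % 2 (exact for 0 ≤ i ≤ 7)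
  let faces := (PySem.List.pyRange 0 8 1).foldl (fun faces i =>
    let zi : Int := i % 2
    let yi : Int := (i / 2) % 2
    let xi : Int := (i / 4) % 2
    let vertex := (x + xi, y + yi, z + zi)
    let faces := pvAppendAt faces (if zi ≠ 0 then 0 else 1) vertex
    let faces := pvAppendAt faces (if yi ≠ 0 then 2 else 3) vertex
    pvAppendAt faces (if xi ≠ 0 then 4 else 5) vertex) faces
  faces.map (fun w => w)

-- ===== PORT B =====
def create_faces_alt (x : Int) (y : Int) (z : Int) : List (List (Int × Int × Int)) :=
  let v000 := (x, y, z)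
  let v001 := (x, y, z + 1)
  let v010 := (x, y + 1, z)
  let v011 := (x, y + 1, z + 1)
  let v100 := (x + 1, y, z)
  let v101 := (x + 1, y, z + 1)
  let v110 := (x + 1, y + 1, z)
  let v111 := (x + 1, y + 1, z + 1)
  [ [v001, v011, v101, v111],
    [v000, v010, v100, v110],
    [v010, v011, v110, v111],
    [v000, v001, v100, v101],
    [v100, v101, v110, v111],
    [v000, v001, v010, v011] ]

-- ===== PRECONDITION & SPEC =====
def Spec_create_faces (x : Int) (y : Int) (z : Int) (out : List (List (Int × Int × Int))) : Prop := out = create_faces_alt x y z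
instance (x : Int) (y : Int) (z : Int) (out : List (List (Int × Int × Int))) : Decidable (Spec_create_faces x y z out) := by unfold Spec_create_faces; infer_instance

-- ===== CLAIM (what is proved, stated in full; the proofs are below) =====
def Claim_equal_create_faces : Prop := ∀ (x : Int) (y : Int) (z : Int), Dom_create_faces x y z → Spec_create_faces x y z (create_faces x y z)

-- ===== LEMMAS AND PROOFS =====

-- ===== VERDICT (by name: the statement is the Claim_ definition above) =====
theorem create_faces_spec : Claim_equal_create_faces := by
  intro x y z _
  show create_faces x y z = create_faces_alt x y z
  simp [create_faces, create_faces_alt, PySem.List.pyRange, List.range_succ, pvAppendAt]
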